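-- pv_equiv track=rewrite | github.com/lazy-fortran/standard | tests/Fortran2003/test_issue24_semantic_c_interop.py | verify_token_sequence
-- ===== SOURCE A (Python) =====
-- def verify_token_sequence(tokens, required_sequence):
--     """Verify that required token sequence appears in order"""
--     sequence_lower = [t.lower() for t in required_sequence]
--     seq_len = len(sequence_lower)
--
--     # Find all positions of first token
--     first_token = sequence_lower[0]
--     start_positions = [
--         i for i, token in enumerate(tokens)
--         if token == first_token
--     ]
--
--     for start_pos in start_positions:
--         # Check if we have enough tokens
--         if start_pos + seq_len > len(tokens):
--             continue
--
--         # Check if full sequence matches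
--         match_slice = tokens[start_pos:start_pos + seq_len]
--         if match_slice == sequence_lower:
--             return True
--
--     return False
-- ===== SOURCE B (Python) =====
-- def verify_token_sequence(tokens, required_sequence):
--     """Verify that required token sequence appears in order"""
--     seq = [t.lower() for t in required_sequence]
--     m = len(seq)
--     if m == 0:
--         return True
--     # NFA simulation: single left-to-right pass keeping the lengths of all
--     # partial matches of seq that end at the current position.
--     active = []
--     for t in tokens:
--         active = [j + 1 for j in [0] + active if seq[j] == t]
--         if m in active:
--             return True
--     return False
-- ===== Notes on version B (the rewrite author's own statement) =====
-- stated objective: alternative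
-- what changed: Instead of enumerating every index where the first required token occurs and comparing a materialised slice of tokens against the lowered sequence at each candidate start, B simulates the pattern's matching NFA: a single left-to-right pass over tokens that maintains the set of lengths of all partial matches of the lowered sequence ending at the current position, succeeding as soon as a full-length match appears.
import Mathlib
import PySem

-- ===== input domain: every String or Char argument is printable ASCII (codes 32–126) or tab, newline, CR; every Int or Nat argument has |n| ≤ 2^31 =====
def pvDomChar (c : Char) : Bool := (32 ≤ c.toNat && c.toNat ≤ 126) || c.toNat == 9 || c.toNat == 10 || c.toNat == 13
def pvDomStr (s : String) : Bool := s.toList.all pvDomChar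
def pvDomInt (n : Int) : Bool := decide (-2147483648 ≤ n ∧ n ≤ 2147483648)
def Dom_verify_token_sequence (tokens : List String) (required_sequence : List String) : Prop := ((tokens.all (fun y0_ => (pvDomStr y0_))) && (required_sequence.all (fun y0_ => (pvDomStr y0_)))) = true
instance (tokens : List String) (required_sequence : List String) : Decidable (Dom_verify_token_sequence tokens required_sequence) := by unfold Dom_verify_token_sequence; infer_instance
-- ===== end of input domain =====

-- B replaces A's enumerate-candidate-starts-and-compare-slices search by an NFA simulation:
-- one left-to-right pass maintaining the set of lengths of all partial matches ending at the
-- current position (alternative algorithm, no slicing; return value only, no mutation).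

-- ===== PORT A =====
def verify_token_sequence (tokens : List String) (required_sequence : List String) : Bool :=
  let sequence_lower := required_sequence.map PySem.Str.lower
  let seq_len : Int := sequence_lower.length
  match PySem.List.pyGet? sequence_lower 0 with
  | none => false    -- Python raises IndexError here (empty required_sequence); excluded by Pre_
  | some first_token =>
    let start_positions : List Int :=
      ((PySem.List.enumerate tokens).filter (fun p => p.2 == first_token)).map (fun p => p.1)
    start_positions.any (fun start_pos =>
      if start_pos + seq_len > (tokens.length : Int) then false
      else PySem.List.slice tokens (some start_pos) (some (start_pos + seq_len)) == sequence_lower)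

-- ===== PORT B =====
-- [j + 1 for j in [0] + active if seq[j] == t]; every j reached is < len seq (the loop returns
-- as soon as a full match length appears), so getD is exact for Python's seq[j] here.
def pvStep (seq : List String) (active : List Nat) (t : String) : List Nat :=
  ((0 :: active).filter (fun j => seq.getD j "" == t)).map (fun j => j + 1)

-- the 'for t in tokens' loop of Source B with its early return
def pvLoop (seq : List String) (m : Nat) : List String → List Nat → Bool
  | [], _ => false
  | t :: ts, active =>
      let active' := pvStep seq active t
      if active'.contains m then true else pvLoop seq m ts active'

def verify_token_sequence_alt (tokens : List String) (required_sequence : List String) : Bool :=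
  let seq := required_sequence.map PySem.Str.lower
  let m := seq.length
  if m == 0 then true
  else pvLoop seq m tokens []

-- ===== PRECONDITION & SPEC =====
-- Python A evaluates sequence_lower[0] and raises IndexError when required_sequence is empty.
def Pre_verify_token_sequence (tokens : List String) (required_sequence : List String) : Prop :=
  required_sequence ≠ []
instance (tokens : List String) (required_sequence : List String) : Decidable (Pre_verify_token_sequence tokens required_sequence) := by unfold Pre_verify_token_sequence; infer_instance

def pvWitness_verify_token_sequence : List String × List String :=
  (["a", "b", "c"], ["B", "c"])

def Spec_verify_token_sequence (tokens : List String) (required_sequence : List String) (out : Bool) : Prop := out = verify_token_sequence_alt tokens required_sequence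
instance (tokens : List String) (required_sequence : List String) (out : Bool) : Decidable (Spec_verify_token_sequence tokens required_sequence out) := by unfold Spec_verify_token_sequence; infer_instance

-- ===== CLAIM (what is proved, stated in full; the proofs are below) =====
def Claim_equal_verify_token_sequence : Prop := ∀ (tokens : List String) (required_sequence : List String), Dom_verify_token_sequence tokens required_sequence → Pre_verify_token_sequence tokens required_sequence → Spec_verify_token_sequence tokens required_sequence (verify_token_sequence tokens required_sequence)

-- ===== LEMMAS AND PROOFS =====

-- the meaning of one NFA step: active' holds exactly the partial-match lengths ending at i+1
theorem pvStep_iff (seq T : List String) (active : List Nat) (i : Nat)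
    (hm : 1 ≤ seq.length) (hi : i < T.length) (ht : T[i]? = some t)
    (hinv : ∀ j, j ∈ active ↔
      (1 ≤ j ∧ j < seq.length ∧ j ≤ i ∧ (T.drop (i - j)).take j = seq.take j)) :
    ∀ j', j' ∈ pvStep seq active t ↔
      (1 ≤ j' ∧ j' ≤ seq.length ∧ j' ≤ i + 1 ∧
        (T.drop (i + 1 - j')).take j' = seq.take j') := by
  intro j'
  have htmem : t = T.getD i "" := by
    rw [List.getD_eq_getElem?_getD, ht]; rfl
  simp only [pvStep, List.mem_map, List.mem_filter, List.mem_cons, beq_iff_eq]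
  constructor
  · rintro ⟨j, ⟨hj, hseqj⟩, rfl⟩
    have hjlt : j < seq.length := by
      rcases hj with rfl | hj
      · omega
      · exact ((hinv j).1 hj).2.1
    have hji : j ≤ i := by
      rcases hj with rfl | hj
      · omega
      · exact ((hinv j).1 hj).2.2.1
    have hwin : (T.drop (i - j)).take j = seq.take j := by
      rcases hj with rfl | hj
      · simp
      · exact ((hinv j).1 hj).2.2.2
    refine ⟨by omega, by omega, by omega, ?_⟩
    have hik : i + 1 - (j + 1) = i - j := by omega
    rw [hik, List.take_succ, List.take_succ, hwin]
    have h1 : (T.drop (i - j))[j]? = T[i]? := by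
      rw [List.getElem?_drop]; congr 1; omega
    have h2 : seq[j]? = some (seq.getD j "") := by
      rw [List.getD_eq_getElem?_getD, List.getElem?_eq_getElem hjlt]; rfl
    rw [h1, ht, h2, hseqj, htmem]
  · rintro ⟨h1, h2, h3, hwin⟩
    obtain ⟨j, rfl⟩ : ∃ j, j' = j + 1 := ⟨j' - 1, by omega⟩
    have hjlt : j < seq.length := by omega
    have hik : i + 1 - (j + 1) = i - j := by omega
    rw [hik, List.take_succ, List.take_succ] at hwin
    have hg1 : (T.drop (i - j))[j]? = T[i]? := by
      rw [List.getElem?_drop]; congr 1; omega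
    rw [hg1, ht, List.getElem?_eq_getElem hjlt] at hwin
    have hlen1 : ((T.drop (i - j)).take j).length = j := by
      simp [List.length_take, List.length_drop]; omega
    have hlen2 : (seq.take j).length = j := by
      simp [List.length_take]; omega
    have := List.append_inj hwin (by rw [hlen1, hlen2])
    obtain ⟨hwj, hel⟩ := this
    simp only [Option.toList_some, List.cons.injEq] at hel
    have hseqj : seq.getD j "" = t := by
      rw [List.getD_eq_getElem?_getD, List.getElem?_eq_getElem hjlt]
      simp [← hel.1, htmem]
    rcases Nat.eq_zero_or_pos j with rfl | hjpos
    · exact ⟨0, ⟨Or.inl rfl, hseqj⟩, rfl⟩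
    · exact ⟨j, ⟨Or.inr ((hinv j).2 ⟨hjpos, hjlt, by omega, hwj⟩), hseqj⟩, rfl⟩

-- the loop finds exactly the occurrences ending strictly after the processed prefix
theorem pvLoop_iff (seq T : List String) (hm : 1 ≤ seq.length) :
    ∀ (ts : List String) (i : Nat) (active : List Nat),
      ts = T.drop i → i ≤ T.length →
      (∀ j, j ∈ active ↔
        (1 ≤ j ∧ j < seq.length ∧ j ≤ i ∧ (T.drop (i - j)).take j = seq.take j)) →
      (pvLoop seq seq.length ts active = true ↔
        ∃ e, i < e ∧ e ≤ T.length ∧ seq.length ≤ e ∧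
          (T.drop (e - seq.length)).take seq.length = seq) := by
  intro ts
  induction ts with
  | nil =>
    intro i active hts hi _
    have : T.length ≤ i := by
      have := congrArg List.length hts
      simp [List.length_drop] at this; omega
    simp only [pvLoop, Bool.false_eq_true, false_iff]
    rintro ⟨e, he1, he2, _, _⟩; omega
  | cons t ts' ih =>
    intro i active hts hi hinv
    have hi' : i < T.length := by
      by_contra h
      rw [List.drop_eq_nil_of_le (by omega)] at hts
      exact List.cons_ne_nil _ _ hts
    have ht : T[i]? = some t := by
      have h := congrArg (fun l => l[0]?) hts
      simpa [List.getElem?_drop] using h.symm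
    have hts' : ts' = T.drop (i + 1) := by
      have h := congrArg (fun l => l.drop 1) hts
      simpa [List.drop_drop] using h
    have hstep := pvStep_iff seq T active i hm hi' ht hinv
    simp only [pvLoop]
    by_cases hc : (pvStep seq active t).contains seq.length
    · simp only [hc, if_true, true_iff]
      have := (hstep seq.length).1 (by simpa using hc)
      refine ⟨i + 1, by omega, by omega, by omega, ?_⟩
      have := this.2.2.2
      simpa using this
    · simp only [hc, Bool.false_eq_true, if_false]
      have hc' : ¬ seq.length ∈ pvStep seq active t := by
        simpa [List.contains_eq_mem] using hc
      have hnotend : ¬ (seq.length ≤ i + 1 ∧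
          (T.drop (i + 1 - seq.length)).take seq.length = seq) := by
        rintro ⟨h1, h2⟩
        exact hc' ((hstep seq.length).2 ⟨hm, le_refl _, h1, by simpa using h2⟩)
      rw [ih (i + 1) (pvStep seq active t) hts' (by omega) ?inv]
      case inv =>
        intro j
        rw [hstep j]
        constructor
        · rintro ⟨a, b, c, d⟩
          have hne : j ≠ seq.length := fun h => hc' (h ▸ (hstep j).2 ⟨a, b, c, d⟩)
          exact ⟨a, by omega, c, d⟩
        · rintro ⟨a, b, c, d⟩
          exact ⟨a, by omega, c, d⟩
      constructor
      · rintro ⟨e, he1, he2, he3, he4⟩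
        exact ⟨e, by omega, he2, he3, he4⟩
      · rintro ⟨e, he1, he2, he3, he4⟩
        rcases Nat.eq_or_lt_of_le he1 with heq | hlt
        · subst heq
          exact absurd ⟨he3, he4⟩ hnotend
        · exact ⟨e, by omega, he2, he3, he4⟩

-- B returns true iff the lowered sequence occurs as a contiguous block
theorem alt_iff (T rs : List String) (f : String) (seq' : List String)
    (hseq : rs.map PySem.Str.lower = f :: seq') :
    (verify_token_sequence_alt T rs = true ↔
      ∃ k, k < T.length ∧ (T.drop k).take (seq'.length + 1) = f :: seq') := by
  unfold verify_token_sequence_alt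
  rw [hseq]
  have hm : 1 ≤ (f :: seq').length := by simp
  simp only [List.length_cons, beq_iff_eq, Nat.succ_ne_zero, if_false]
  have key := pvLoop_iff (f :: seq') T hm T 0 [] (by simp) (by omega)
    (by intro j; simp; intro h1 _ h3; exact absurd h3 (by omega))
  simp only [List.length_cons] at key
  rw [key]
  constructor
  · rintro ⟨e, he1, he2, he3, he4⟩
    refine ⟨e - (seq'.length + 1), by omega, ?_⟩
    exact he4
  · rintro ⟨k, hk, hslice⟩
    have hlen := congrArg List.length hslice
    simp [List.length_take, List.length_drop] at hlen
    refine ⟨k + (seq'.length + 1), by omega, by omega, by omega, ?_⟩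
    simpa [Nat.add_sub_cancel] using hslice

-- A returns true iff the lowered sequence occurs as a contiguous block
theorem a_iff (T rs : List String) (f : String) (seq' : List String)
    (hseq : rs.map PySem.Str.lower = f :: seq') :
    (verify_token_sequence T rs = true ↔
      ∃ k, k < T.length ∧ (T.drop k).take (seq'.length + 1) = f :: seq') := by
  unfold verify_token_sequence
  rw [hseq]
  simp only [PySem.List.pyGet?]
  simp only [PySem.List.pyIdx?]
  norm_num
  simp only [PySem.List.mem_enumerate_iff]
  have hcast : ∀ k : Nat, ((k:Int) + ((seq'.length:Int) + 1))
      = ((k:Int) + ((seq'.length + 1 : Nat) : Int)) := by intro k; push_cast; ring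
  constructor
  · rintro ⟨a, b, ⟨k, hk, hab⟩, hbf, hle, hslice⟩
    rw [Prod.ext_iff] at hab
    obtain ⟨ha, hb⟩ := hab
    simp only at ha hb
    rw [ha, zero_add, hcast, PySem.List.slice_natCast_add] at hslice
    exact ⟨k, hk, by simpa using hslice⟩
  · rintro ⟨k, hk, hslice⟩
    have hlen := congrArg List.length hslice
    simp [List.length_take, List.length_drop] at hlen
    refine ⟨(k:Int), T[k]'hk, ⟨k, hk, by simp⟩, ?_, by omega, ?_⟩
    · have h0 : T[k]'hk = ((T.drop k).take (seq'.length + 1))[0]'(by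
        simp [List.length_take, List.length_drop]; omega) := by
        simp [List.getElem_take, List.getElem_drop]
      rw [h0]
      simp [hslice]
    · rw [hcast, PySem.List.slice_natCast_add]
      exact hslice

-- ===== VERDICT (by name: the statement is the Claim_ definition above) =====
theorem verify_token_sequence_spec : Claim_equal_verify_token_sequence := by
  intro tokens rs _ hpre
  unfold Spec_verify_token_sequence
  obtain ⟨f, seq', hseq⟩ : ∃ f s', rs.map PySem.Str.lower = f :: s' := by
    cases rs with
    | nil => exact absurd rfl hpre
    | cons a b => exact ⟨_, _, rfl⟩
  rw [Bool.eq_iff_iff, a_iff tokens rs f seq' hseq, alt_iff tokens rs f seq' hseq]
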